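-- pv_equiv track=rewrite | github.com/jameschen1212/TextModel | finalproject.py | stem
-- ===== SOURCE A (Python) =====
-- def stem(s):
--     """accepts a string as a parameter. The function should then return the stem of s"""
--     if(s[-1:] == 's'):
--         if(len(s) < 3):
--             s = s
--         else:
--             s = s[:-1]
--             return stem(s)
--
--
--     elif(s[-3:] == 'ing'):
--         if(len(s) < 5):
--             s = s
--         else:
--             if(s[-4] == s[-5]):
--                s = s[:-4]
--             else:
--                 s = s[:-3]
--     elif(s[-2:] == 'er'):
--         s = s[:-2]
--
--     elif(s[-2:] == 'ed'):
--         if(len(s) < 4):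
--             s = s
--         else:
--             s = s[:-2]
--     elif(s[-2:] == 'es'):
--         if(len(s) < 4):
--             s = s
--         else:
--             s = s[:-2]
--     elif(s[-3:] == 'est'):
--         if(len(s) < 5):
--             s = s
--         else:
--             s = s[:-3]
--     elif(s[-3:] == 'less'):
--         if(len(s) < 5):
--             s = s
--         else:
--             s = s[:-3]
--     elif(s[-1:] == 'y'):
--         if(len(s) < 5):
--             s = s
--         else:
--             s = s[:-1] + 'i'
--     return s
-- ===== SOURCE B (Python) =====
-- def stem(s):
--     """accepts a string as a parameter. The function should then return the stem of s"""
--     while len(s) >= 3 and s.endswith('s'):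
--         s = s[:-1]
--     if s.endswith('s'):
--         return s
--     if s.endswith('ing'):
--         if len(s) >= 5:
--             s = s[:-4] if s[-4] == s[-5] else s[:-3]
--     elif s.endswith('er'):
--         s = s[:-2]
--     elif s.endswith('ed'):
--         if len(s) >= 4:
--             s = s[:-2]
--     elif s.endswith('est'):
--         if len(s) >= 5:
--             s = s[:-3]
--     elif s.endswith('y'):
--         if len(s) >= 5:
--             s = s[:-1] + 'i'
--     return s
-- ===== Notes on version B (the rewrite author's own statement) =====
-- stated objective: simpler
-- what changed: Replaces A's whole-function recursion for stripping the trailing plural letter with an explicit while loop followed by a single non-recursive if/elif chain, and drops A's two unreachable suffix branches (one shadowed by the earlier plural branch, one comparing a three-character slice against a four-character suffix).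
import Mathlib
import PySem

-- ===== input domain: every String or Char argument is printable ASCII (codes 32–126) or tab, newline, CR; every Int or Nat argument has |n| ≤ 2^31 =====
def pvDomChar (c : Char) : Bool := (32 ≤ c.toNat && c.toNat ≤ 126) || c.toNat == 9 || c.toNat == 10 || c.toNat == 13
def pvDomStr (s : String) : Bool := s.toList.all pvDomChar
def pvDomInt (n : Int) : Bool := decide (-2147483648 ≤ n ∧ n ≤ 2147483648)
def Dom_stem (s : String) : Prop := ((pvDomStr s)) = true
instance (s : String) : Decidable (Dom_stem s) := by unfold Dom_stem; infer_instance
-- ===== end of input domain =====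

-- B replaces A's whole-function recursion (re-entered after each trailing-'s' strip) by an
-- explicit while loop followed by a single non-recursive suffix chain; objective: simpler.

-- ===== PORT A =====
-- literal transliteration of A's recursive suffix chain, on List Char
def stemAux (s : List Char) : List Char :=
  if PySem.Chars.slice s (some (-1)) none = ['s'] then
    if s.length < 3 then s
    else stemAux (PySem.Chars.slice s none (some (-1)))
  else if PySem.Chars.slice s (some (-3)) none = ['i','n','g'] then
    if s.length < 5 then s
    else if PySem.List.pyGet? s (-4) = PySem.List.pyGet? s (-5) then
      PySem.Chars.slice s none (some (-4))
    else PySem.Chars.slice s none (some (-3))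
  else if PySem.Chars.slice s (some (-2)) none = ['e','r'] then
    PySem.Chars.slice s none (some (-2))
  else if PySem.Chars.slice s (some (-2)) none = ['e','d'] then
    if s.length < 4 then s else PySem.Chars.slice s none (some (-2))
  else if PySem.Chars.slice s (some (-2)) none = ['e','s'] then
    if s.length < 4 then s else PySem.Chars.slice s none (some (-2))
  else if PySem.Chars.slice s (some (-3)) none = ['e','s','t'] then
    if s.length < 5 then s else PySem.Chars.slice s none (some (-3))
  else if PySem.Chars.slice s (some (-3)) none = ['l','e','s','s'] then
    if s.length < 5 then s else PySem.Chars.slice s none (some (-3))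
  else if PySem.Chars.slice s (some (-1)) none = ['y'] then
    if s.length < 5 then s
    else PySem.Chars.slice s none (some (-1)) ++ ['i']
  else s
termination_by s.length
decreasing_by
  simp only [PySem.Chars.slice_eq_listSlice, PySem.List.slice_to_neg_one]
  have : s ≠ [] := by rintro rfl; simp at *
  simpa [List.length_dropLast] using Nat.sub_lt (List.length_pos_of_ne_nil this) one_pos

def stem (s : String) : String := String.ofList (stemAux s.toList)

-- ===== PORT B =====
-- while len(s) >= 3 and s.endswith('s'): s = s[:-1]
def stripS (s : List Char) : List Char :=
  if 3 ≤ s.length ∧ PySem.Chars.endswith s ['s'] = true then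
    stripS (PySem.Chars.slice s none (some (-1)))
  else s
termination_by s.length
decreasing_by
  simp only [PySem.Chars.slice_eq_listSlice, PySem.List.slice_to_neg_one]
  have : s ≠ [] := by rintro rfl; simp_all
  simpa [List.length_dropLast] using Nat.sub_lt (List.length_pos_of_ne_nil this) one_pos

-- the single if/elif chain after the loop (B returns early when s still ends in 's')
def stemChain (s : List Char) : List Char :=
  if PySem.Chars.endswith s ['s'] then s
  else if PySem.Chars.endswith s ['i','n','g'] then
    if 5 ≤ s.length then
      if PySem.List.pyGet? s (-4) = PySem.List.pyGet? s (-5) then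
        PySem.Chars.slice s none (some (-4))
      else PySem.Chars.slice s none (some (-3))
    else s
  else if PySem.Chars.endswith s ['e','r'] then PySem.Chars.slice s none (some (-2))
  else if PySem.Chars.endswith s ['e','d'] then
    if 4 ≤ s.length then PySem.Chars.slice s none (some (-2)) else s
  else if PySem.Chars.endswith s ['e','s','t'] then
    if 5 ≤ s.length then PySem.Chars.slice s none (some (-3)) else s
  else if PySem.Chars.endswith s ['y'] then
    if 5 ≤ s.length then PySem.Chars.slice s none (some (-1)) ++ ['i'] else s
  else s

def stem_alt (s : String) : String := String.ofList (stemChain (stripS s.toList))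

-- ===== PRECONDITION & SPEC =====
def Spec_stem (s : String) (out : String) : Prop := out = stem_alt s
instance (s : String) (out : String) : Decidable (Spec_stem s out) := by unfold Spec_stem; infer_instance

-- ===== CLAIM (what is proved, stated in full; the proofs are below) =====
def Claim_equal_stem : Prop := ∀ (s : String), Dom_stem s → Spec_stem s (stem s)

-- ===== LEMMAS AND PROOFS =====
theorem drop_eq_iff (s pat : List Char) : (s.drop (s.length - pat.length) = pat) ↔ pat <:+ s := by
  rw [List.suffix_iff_eq_drop]; exact eq_comm

theorem tail1 (s : List Char) (c : Char) :
    (PySem.Chars.slice s (some (-1)) none = [c]) ↔ PySem.Chars.endswith s [c] = true := by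
  rw [PySem.Chars.endswith_iff]
  have h : PySem.Chars.slice s (some (-1)) none = s.drop (s.length - 1) := by
    simp [PySem.List.slice_from_neg_one]
  rw [h, show (1:Nat) = ([c] : List Char).length from rfl, drop_eq_iff]

theorem tail2 (s : List Char) (c d : Char) :
    (PySem.Chars.slice s (some (-2)) none = [c, d]) ↔ PySem.Chars.endswith s [c, d] = true := by
  rw [PySem.Chars.endswith_iff]
  have h : PySem.Chars.slice s (some (-2)) none = s.drop (s.length - 2) := by
    simp [PySem.List.slice_from_neg_ofNat s 2 (by omega)]
  rw [h, show (2:Nat) = ([c, d] : List Char).length from rfl, drop_eq_iff]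

theorem tail3 (s : List Char) (c d e : Char) :
    (PySem.Chars.slice s (some (-3)) none = [c, d, e]) ↔ PySem.Chars.endswith s [c, d, e] = true := by
  rw [PySem.Chars.endswith_iff]
  have h : PySem.Chars.slice s (some (-3)) none = s.drop (s.length - 3) := by
    simp [PySem.List.slice_from_neg_ofNat s 3 (by omega)]
  rw [h, show (3:Nat) = ([c, d, e] : List Char).length from rfl, drop_eq_iff]

theorem tail_less (s : List Char) : ¬ (PySem.Chars.slice s (some (-3)) none = ['l','e','s','s']) := by
  intro h
  have h3 : PySem.Chars.slice s (some (-3)) none = s.drop (s.length - 3) := by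
    simp [PySem.List.slice_from_neg_ofNat s 3 (by omega)]
  rw [h3] at h
  have := congrArg List.length h
  simp [List.length_drop] at this
  omega

theorem es_ends_s (s : List Char) (h : PySem.Chars.endswith s ['e','s'] = true) :
    PySem.Chars.endswith s ['s'] = true := by
  rw [PySem.Chars.endswith_iff] at *
  exact List.IsSuffix.trans ⟨['e'], rfl⟩ h

-- the non-'s' case: the two chains agree once the extra unreachable branches are discharged
theorem chain_case (s : List Char) (hs : ¬ PySem.Chars.endswith s ['s'] = true) :
    stemAux s = stemChain s := by
  rw [stemAux, stemChain]
  simp only [tail1, tail2, tail3]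
  rw [if_neg hs, if_neg hs]
  split_ifs with h1 h2 h3 h4 h5 h6 h7 h8 h9 <;>
    first
      | rfl
      | omega
      | (exact absurd (es_ends_s s (by assumption)) hs)
      | (exact absurd (by assumption) (tail_less s))

theorem key : ∀ (n : Nat) (s : List Char), s.length ≤ n → stemAux s = stemChain (stripS s) := by
  intro n
  induction n with
  | zero =>
    intro s h
    have hnil : s = [] := List.eq_nil_of_length_eq_zero (Nat.le_zero.mp h)
    subst hnil
    have hs : ¬ PySem.Chars.endswith ([] : List Char) ['s'] = true := by decide
    rw [show stripS [] = [] from by rw [stripS]; simp]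
    exact chain_case [] hs
  | succ n ih =>
    intro s h
    by_cases hs : PySem.Chars.endswith s ['s'] = true
    · have hlen : 1 ≤ s.length := by
        rw [PySem.Chars.endswith_iff] at hs
        have := hs.length_le; simpa using this
      by_cases h3 : s.length < 3
      · rw [stemAux, if_pos ((tail1 s 's').mpr hs), if_pos h3]
        rw [show stripS s = s from by rw [stripS]; rw [if_neg (by omega)]]
        rw [stemChain, if_pos hs]
      · rw [stemAux, if_pos ((tail1 s 's').mpr hs), if_neg h3]
        rw [show stripS s = stripS (PySem.Chars.slice s none (some (-1))) from by
          conv_lhs => rw [stripS]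
          rw [if_pos ⟨by omega, hs⟩]]
        have hlt : (PySem.Chars.slice s none (some (-1))).length ≤ n := by
          simp only [PySem.Chars.slice_eq_listSlice, PySem.List.slice_to_neg_one,
            List.length_dropLast]
          omega
        exact ih _ hlt
    · rw [show stripS s = s from by rw [stripS]; rw [if_neg (by simp [hs])]]
      exact chain_case s hs

-- ===== VERDICT (by name: the statement is the Claim_ definition above) =====
theorem stem_spec : Claim_equal_stem := by
  intro s _
  unfold Spec_stem stem stem_alt
  rw [key s.toList.length s.toList le_rfl]
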